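-- pv_equiv track=rewrite | github.com/AmSach/sentience | src/lsp/python_server.py | get_import_blocks
-- ===== SOURCE A (Python) =====
-- from typing import Any, Dict, List, Optional, Tuple, Union
--
-- def get_import_blocks(content: str) -> List[Tuple[int, int]]:
--     """Get the start and end line numbers of import blocks."""
--     lines = content.split("\n")
--     blocks = []
--
--     in_block = False
--     block_start = 0
--
--     for i, line in enumerate(lines):
--         is_import = line.strip().startswith(("import ", "from "))
--
--         if is_import and not in_block:
--             in_block = True
--             block_start = i
--         elif not is_import and not line.strip().startswith("#") and in_block:
--             in_block = False
--             blocks.append((block_start, i - 1))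
--
--     if in_block:
--         blocks.append((block_start, len(lines) - 1))
--
--     return blocks
-- ===== SOURCE B (Python) =====
-- def get_import_blocks(content):
--     """Get the start and end line numbers of import blocks."""
--     lines = content.split("\n")
--     # 0 = import line, 1 = comment line, 2 = anything else
--     kinds = []
--     for line in lines:
--         s = line.strip()
--         if s.startswith(("import ", "from ")):
--             kinds.append(0)
--         elif s.startswith("#"):
--             kinds.append(1)
--         else:
--             kinds.append(2)
--     n = len(kinds)
--     blocks = []
--     i = 0
--     while i < n:
--         if kinds[i] != 0:
--             i += 1
--             continue
--         j = i + 1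
--         while j < n and kinds[j] != 2:
--             j += 1
--         blocks.append((i, j - 1))
--         i = j + 1
--     return blocks
-- ===== Notes on version B (the rewrite author's own statement) =====
-- stated objective: alternative
-- what changed: A threads a boolean in_block flag through one enumerate loop; B first classifies every line as import/comment/other and then scans that classification with a block-jumping inner loop that finds each block's terminator directly.
import Mathlib
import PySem

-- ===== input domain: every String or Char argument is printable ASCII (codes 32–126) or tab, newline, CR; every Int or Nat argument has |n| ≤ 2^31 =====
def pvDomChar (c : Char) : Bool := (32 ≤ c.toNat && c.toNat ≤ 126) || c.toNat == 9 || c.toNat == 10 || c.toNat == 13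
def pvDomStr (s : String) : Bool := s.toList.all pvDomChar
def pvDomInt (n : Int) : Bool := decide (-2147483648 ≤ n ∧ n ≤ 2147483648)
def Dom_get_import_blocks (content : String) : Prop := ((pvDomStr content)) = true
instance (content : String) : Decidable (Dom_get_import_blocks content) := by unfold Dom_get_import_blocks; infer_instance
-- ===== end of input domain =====

-- B replaces A's boolean in-block state machine by a pre-classification of each line
-- (import/comment/other) and a block-jumping scan; objective: alternative decomposition, same cost.

-- ===== PORT A =====
-- the body of A's for-loop (state = (blocks, in_block, block_start))
def pvStepA (acc : List (Int × Int) × Bool × Int) (iline : Int × String) : List (Int × Int) × Bool × Int :=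
  let is_import := PySem.Str.startswith (PySem.Str.strip iline.2) "import " ||
                   PySem.Str.startswith (PySem.Str.strip iline.2) "from "
  if is_import && !acc.2.1 then
    (acc.1, true, iline.1)
  else if !is_import && !(PySem.Str.startswith (PySem.Str.strip iline.2) "#") && acc.2.1 then
    (acc.1 ++ [(acc.2.2, iline.1 - 1)], false, acc.2.2)
  else acc

def get_import_blocks (content : String) : List (Int × Int) :=
  let lines := (PySem.Str.split? content "\n").getD []
  let st := (PySem.List.enumerate lines 0).foldl pvStepA ([], false, 0)
  if st.2.1 then st.1 ++ [(st.2.2, (lines.length : Int) - 1)] else st.1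

-- ===== PORT B =====
-- classification of a line: 0 = import line, 1 = comment line, 2 = anything else
def pvKind (line : String) : Nat :=
  let s := PySem.Str.strip line
  if PySem.Str.startswith s "import " || PySem.Str.startswith s "from " then 0
  else if PySem.Str.startswith s "#" then 1
  else 2

-- Source B's inner while loop: advance j past non-'other' lines; returns (j, remaining kinds after j)
def pvConsume : List Nat → Int → Int × List Nat
  | [], j => (j, [])
  | k :: rest, j => if k ≠ 2 then pvConsume rest (j + 1) else (j, rest)

theorem pvConsume_len_le (ks : List Nat) (j : Int) : (pvConsume ks j).2.length ≤ ks.length := by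
  induction ks generalizing j with
  | nil => simp [pvConsume]
  | cons k rest ih =>
    simp only [pvConsume]
    split
    · exact le_trans (ih _) (Nat.le_succ _)
    · simp

-- Source B's outer while loop over the kinds list
def pvScan : List Nat → Int → List (Int × Int)
  | [], _ => []
  | k :: rest, i =>
    if k ≠ 0 then pvScan rest (i + 1)
    else
      let c := pvConsume rest (i + 1)
      (i, c.1 - 1) :: pvScan c.2 (c.1 + 1)
termination_by ks _ => ks.length
decreasing_by
  · simp
  · exact Nat.lt_succ_of_le (pvConsume_len_le rest (i + 1))

def get_import_blocks_alt (content : String) : List (Int × Int) :=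
  let lines := (PySem.Str.split? content "\n").getD []
  pvScan (lines.map pvKind) 0

-- ===== PRECONDITION & SPEC =====
def Spec_get_import_blocks (content : String) (out : List (Int × Int)) : Prop := out = get_import_blocks_alt content
instance (content : String) (out : List (Int × Int)) : Decidable (Spec_get_import_blocks content out) := by unfold Spec_get_import_blocks; infer_instance

-- ===== CLAIM (what is proved, stated in full; the proofs are below) =====
def Claim_equal_get_import_blocks : Prop := ∀ (content : String), Dom_get_import_blocks content → Spec_get_import_blocks content (get_import_blocks content)

-- ===== LEMMAS AND PROOFS =====

-- A's final step: emit the still-open block (with end n-1) if the loop left in_block set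
def pvFinA (st : List (Int × Int) × Bool × Int) (n : Int) : List (Int × Int) :=
  if st.2.1 then st.1 ++ [(st.2.2, n - 1)] else st.1

theorem pvMain (lines : List String) :
    (∀ (i : Int) (acc : List (Int × Int)) (bs : Int),
      pvFinA ((PySem.List.enumerate lines i).foldl pvStepA (acc, false, bs)) (i + lines.length)
        = acc ++ pvScan (lines.map pvKind) i) ∧
    (∀ (i : Int) (acc : List (Int × Int)) (bs : Int),
      pvFinA ((PySem.List.enumerate lines i).foldl pvStepA (acc, true, bs)) (i + lines.length)
        = acc ++ (bs, (pvConsume (lines.map pvKind) i).1 - 1)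
              :: pvScan (pvConsume (lines.map pvKind) i).2 ((pvConsume (lines.map pvKind) i).1 + 1)) := by
  induction lines with
  | nil =>
    constructor <;> intro i acc bs <;>
      simp [PySem.List.enumerate_nil, pvFinA, pvScan, pvConsume]
  | cons line rest ih =>
    obtain ⟨ihF, ihT⟩ := ih
    have hlen : ∀ i : Int, i + ((line :: rest).length : Int) = (i + 1) + (rest.length : Int) := by
      intro i; simp; omega
    by_cases hA : PySem.Chars.startswith (PySem.Chars.strip line.toList) ['i','m','p','o','r','t',' '] = true <;>
    by_cases hB : PySem.Chars.startswith (PySem.Chars.strip line.toList) ['f','r','o','m',' '] = true <;>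
    by_cases hC : PySem.Chars.startswith (PySem.Chars.strip line.toList) ['#'] = true <;>
    (constructor <;> intro i acc bs <;>
      rw [PySem.List.enumerate_cons, List.foldl_cons, hlen] <;>
      simp [pvStepA, pvKind, pvScan, pvConsume, hA, hB, hC, ihF, ihT])
-- ===== VERDICT (by name: the statement is the Claim_ definition above) =====
theorem get_import_blocks_spec : Claim_equal_get_import_blocks := by
  intro content _
  unfold Spec_get_import_blocks get_import_blocks get_import_blocks_alt
  have h := (pvMain ((PySem.Str.split? content "\n").getD [])).1 0 [] 0
  simpa [pvFinA] using h
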